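-- pv_equiv track=rewrite | github.com/frido22/ai_paper_agent | src/ingestion/utils/pdf_extraction.py | _remove_duplicate_tables
-- ===== SOURCE A (Python) =====
-- from typing import Tuple, List, Dict, Any
--
-- def _remove_duplicate_tables(tables: List[List[List[str]]]) -> List[List[List[str]]]:
--     """
--     Remove duplicate tables based on content.
--     """
--     unique_tables = []
--     seen_contents = set()
--
--     for table in tables:
--         # Convert table to string representation for comparison
--         table_str = str(table)
--
--         if table_str not in seen_contents:
--             seen_contents.add(table_str)
--             unique_tables.append(table)
--
--     return unique_tables
-- ===== SOURCE B (Python) =====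
-- from typing import List
--
-- def _remove_duplicate_tables(tables: List[List[List[str]]]) -> List[List[List[str]]]:
--     """
--     Remove duplicate tables based on content.
--
--     Sieve-style: repeatedly take the first remaining table, emit it, and
--     filter out every equal table from the rest; no seen-set is maintained.
--     """
--     result = []
--     remaining = tables
--     while remaining:
--         head = remaining[0]
--         result.append(head)
--         remaining = [t for t in remaining[1:] if t != head]
--     return result
-- ===== Notes on version B (the rewrite author's own statement) =====
-- stated objective: alternative
-- what changed: Replaces A's single pass with a seen-set of str(table) keys by a sieve: repeatedly emit the first remaining table and filter all its structural duplicates out of the rest, maintaining no auxiliary index at all.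
import Mathlib
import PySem

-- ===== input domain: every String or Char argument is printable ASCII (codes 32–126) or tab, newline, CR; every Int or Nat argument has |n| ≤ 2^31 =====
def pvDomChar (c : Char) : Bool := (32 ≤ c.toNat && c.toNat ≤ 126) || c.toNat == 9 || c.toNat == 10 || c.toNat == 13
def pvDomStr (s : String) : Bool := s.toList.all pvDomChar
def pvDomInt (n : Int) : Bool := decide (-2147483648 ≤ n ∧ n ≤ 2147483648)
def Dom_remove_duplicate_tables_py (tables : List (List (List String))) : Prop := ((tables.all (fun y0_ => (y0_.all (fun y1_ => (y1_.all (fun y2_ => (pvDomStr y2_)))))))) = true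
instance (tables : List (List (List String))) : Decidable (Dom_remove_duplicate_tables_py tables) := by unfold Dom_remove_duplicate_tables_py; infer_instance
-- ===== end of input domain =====

-- B replaces A's seen-set-of-str(table) pass by a sieve: repeatedly emit the first remaining
-- table and filter its structural duplicates out of the rest — no auxiliary index at all.

-- ===== PORT A =====
-- Hand-written port of Python's str() on a list of lists of strings (no PySem primitive exists for repr).
-- Exact on the stated Dom (printable ASCII plus tab/newline/CR): repr of such a string is the quoted body
-- with backslash/quote/tab/newline/CR escapes, the quote chosen as Python does (single quote unless the
-- string contains a single quote and no double quote).
def reprCharS (c : Char) : List Char :=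
  if c = '\\' then ['\\', '\\']
  else if c = '\'' then ['\\', '\'']
  else if c = '\t' then ['\\', 't']
  else if c = '\n' then ['\\', 'n']
  else if c = '\r' then ['\\', 'r']
  else [c]

def reprCharD (c : Char) : List Char :=
  if c = '\\' then ['\\', '\\']
  else if c = '\t' then ['\\', 't']
  else if c = '\n' then ['\\', 'n']
  else if c = '\r' then ['\\', 'r']
  else [c]

def reprStrChars (cs : List Char) : List Char :=
  if '\'' ∈ cs ∧ '"' ∉ cs then '"' :: (cs.flatMap reprCharD ++ ['"'])
  else '\'' :: (cs.flatMap reprCharS ++ ['\''])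

-- Python's ", "-joining of already-rendered elements
def joinComma : List (List Char) → List Char
  | [] => []
  | [e] => e
  | e :: es => e ++ ',' :: ' ' :: joinComma es

def encRow (r : List String) : List Char :=
  '[' :: (joinComma (r.map (fun s => reprStrChars s.toList)) ++ [']'])

def encTable (t : List (List String)) : List Char :=
  '[' :: (joinComma (t.map encRow) ++ [']'])

-- str(table) as a Lean String
def pyStrTable (t : List (List String)) : String := String.ofList (encTable t)

def remove_duplicate_tables_py (tables : List (List (List String))) : List (List (List String)) :=
  (tables.foldl
    (fun (st : List (List (List String)) × PySem.Set String) table =>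
      let table_str := pyStrTable table
      if PySem.Set.contains st.2 table_str then st
      else (st.1 ++ [table], PySem.Set.add st.2 table_str))
    ([], PySem.Set.empty)).1

-- ===== PORT B =====
-- the while loop of Source B: state (result, remaining); each step emits the head and
-- filters its duplicates from the tail
def rdtSieve (result : List (List (List String))) : List (List (List String)) → List (List (List String))
  | [] => result
  | head :: rest => rdtSieve (result ++ [head]) (rest.filter (fun t => t ≠ head))
termination_by rem => rem.length
decreasing_by
  simp only [List.length_cons, List.length_unattach]
  exact Nat.lt_succ_of_le (le_trans (List.length_filter_le _ _) (by simp))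

def remove_duplicate_tables_py_alt (tables : List (List (List String))) : List (List (List String)) :=
  rdtSieve [] tables

-- ===== PRECONDITION & SPEC =====
def Spec_remove_duplicate_tables_py (tables : List (List (List String))) (out : List (List (List String))) : Prop := out = remove_duplicate_tables_py_alt tables
instance (tables : List (List (List String))) (out : List (List (List String))) : Decidable (Spec_remove_duplicate_tables_py tables out) := by unfold Spec_remove_duplicate_tables_py; infer_instance

-- ===== CLAIM (what is proved, stated in full; the proofs are below) =====
def Claim_equal_remove_duplicate_tables_py : Prop := ∀ (tables : List (List (List String))), Dom_remove_duplicate_tables_py tables → Spec_remove_duplicate_tables_py tables (remove_duplicate_tables_py tables)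

-- ===== LEMMAS AND PROOFS =====

-- A decoder for the encoding above, used only to prove that pyStrTable is injective.
def decEsc (e : Char) : Option Char :=
  if e = '\\' then some '\\'
  else if e = '\'' then some '\''
  else if e = 't' then some '\t'
  else if e = 'n' then some '\n'
  else if e = 'r' then some '\r'
  else none

def decBody (q : Char) : List Char → Option (List Char × List Char)
  | [] => none
  | [c] => if c = q then some ([], []) else none
  | c :: e :: rest =>
    if c = q then some ([], e :: rest)
    else if c = '\\' then
      match decEsc e with
      | none => none
      | some ch =>
        match decBody q rest with
        | none => none
        | some (s, r) => some (ch :: s, r)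
    else
      match decBody q (e :: rest) with
      | none => none
      | some (s, r) => some (c :: s, r)

def decStr (cs : List Char) : Option (List Char × List Char) :=
  match cs with
  | '\'' :: rest => decBody '\'' rest
  | '"' :: rest => decBody '"' rest
  | _ => none

def decElems {α : Type} (dec : List Char → Option (α × List Char)) : Nat → List Char → Option (List α × List Char)
  | _, [] => none
  | fuel, c :: t =>
    if c = ']' then some ([], t)
    else
      match fuel with
      | 0 => none
      | f + 1 =>
        match t with
        | [] => none
        | d :: r =>
          if c = ',' ∧ d = ' ' then
            match dec r with
            | none => none
            | some (x, r') =>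
              match decElems dec f r' with
              | none => none
              | some (xs, r'') => some (x :: xs, r'')
          else none

def decList {α : Type} (dec : List Char → Option (α × List Char)) (cs : List Char) : Option (List α × List Char) :=
  match cs with
  | '[' :: c :: t =>
    if c = ']' then some ([], t)
    else
      match dec (c :: t) with
      | none => none
      | some (x, r) =>
        match decElems dec r.length r with
        | none => none
        | some (xs, r') => some (x :: xs, r')
  | _ => none

def decRow (cs : List Char) : Option (List String × List Char) :=
  match decList decStr cs with
  | none => none
  | some (ss, r) => some (ss.map String.ofList, r)

def decTable (cs : List Char) : Option (List (List String) × List Char) :=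
  decList decRow cs

lemma decBody_q (q : Char) (rest : List Char) : decBody q (q :: rest) = some ([], rest) := by
  cases rest <;> simp [decBody]

-- round-trip: single-quoted bodies
lemma decBody_S (cs : List Char) : ∀ rest, decBody '\'' (cs.flatMap reprCharS ++ '\'' :: rest) = some (cs, rest) := by
  induction cs with
  | nil => intro rest; simpa using decBody_q '\'' rest
  | cons c cs ih =>
    intro rest
    by_cases h1 : c = '\\'
    · subst h1
      simp only [List.flatMap_cons, show reprCharS '\\' = ['\\', '\\'] from rfl,
        List.cons_append, List.nil_append]
      simp [decBody, decEsc, ih rest]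
    · by_cases h2 : c = '\''
      · subst h2
        simp only [List.flatMap_cons, show reprCharS '\'' = ['\\', '\''] from rfl,
          List.cons_append, List.nil_append]
        simp [decBody, decEsc, ih rest]
      · by_cases h3 : c = '\t'
        · subst h3
          simp only [List.flatMap_cons, show reprCharS '\t' = ['\\', 't'] from rfl,
            List.cons_append, List.nil_append]
          simp [decBody, decEsc, ih rest]
        · by_cases h4 : c = '\n'
          · subst h4
            simp only [List.flatMap_cons, show reprCharS '\n' = ['\\', 'n'] from rfl,
              List.cons_append, List.nil_append]
            simp [decBody, decEsc, ih rest]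
          · by_cases h5 : c = '\r'
            · subst h5
              simp only [List.flatMap_cons, show reprCharS '\r' = ['\\', 'r'] from rfl,
                List.cons_append, List.nil_append]
              simp [decBody, decEsc, ih rest]
            · have hrc : reprCharS c = [c] := by simp [reprCharS, h1, h2, h3, h4, h5]
              simp only [List.flatMap_cons, hrc, List.singleton_append]
              have hthis := ih rest
              rcases hfl : cs.flatMap reprCharS ++ '\'' :: rest with _ | ⟨d, t⟩
              · simp at hfl
              · rw [hfl] at hthis
                simp [decBody, h1, h2, hfl, hthis]

-- round-trip: double-quoted bodies (only used when '"' does not occur in the string, as the encoder guarantees)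
lemma decBody_D (cs : List Char) (hq : '"' ∉ cs) : ∀ rest, decBody '"' (cs.flatMap reprCharD ++ '"' :: rest) = some (cs, rest) := by
  induction cs with
  | nil => intro rest; simpa using decBody_q '"' rest
  | cons c cs ih =>
    have hc : c ≠ '"' := fun h => hq (h ▸ List.mem_cons_self ..)
    have hcs : '"' ∉ cs := fun h => hq (List.mem_cons_of_mem _ h)
    intro rest
    by_cases h1 : c = '\\'
    · subst h1
      simp only [List.flatMap_cons, show reprCharD '\\' = ['\\', '\\'] from rfl,
        List.cons_append, List.nil_append]
      simp [decBody, decEsc, ih hcs rest]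
    · by_cases h3 : c = '\t'
      · subst h3
        simp only [List.flatMap_cons, show reprCharD '\t' = ['\\', 't'] from rfl,
          List.cons_append, List.nil_append]
        simp [decBody, decEsc, ih hcs rest]
      · by_cases h4 : c = '\n'
        · subst h4
          simp only [List.flatMap_cons, show reprCharD '\n' = ['\\', 'n'] from rfl,
            List.cons_append, List.nil_append]
          simp [decBody, decEsc, ih hcs rest]
        · by_cases h5 : c = '\r'
          · subst h5
            simp only [List.flatMap_cons, show reprCharD '\r' = ['\\', 'r'] from rfl,
              List.cons_append, List.nil_append]
            simp [decBody, decEsc, ih hcs rest]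
          · have hrc : reprCharD c = [c] := by simp [reprCharD, h1, h3, h4, h5]
            simp only [List.flatMap_cons, hrc, List.singleton_append]
            have hthis := ih hcs rest
            rcases hfl : cs.flatMap reprCharD ++ '"' :: rest with _ | ⟨d, t⟩
            · simp at hfl
            · rw [hfl] at hthis
              simp [decBody, h1, hc, hfl, hthis]

lemma decStr_rt (cs : List Char) (rest : List Char) : decStr (reprStrChars cs ++ rest) = some (cs, rest) := by
  unfold reprStrChars
  split
  · next h => simpa [decStr] using decBody_D cs h.2 rest
  · simpa [decStr] using decBody_S cs rest

-- the tail of a joined list: ", elem, elem, …"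
def encTail {α : Type} (enc : α → List Char) (xs : List α) : List Char :=
  xs.flatMap (fun x => ',' :: ' ' :: enc x)

lemma joinComma_cons {α : Type} (enc : α → List Char) (x : α) (xs : List α) :
    joinComma ((x :: xs).map enc) = enc x ++ encTail enc xs := by
  induction xs generalizing x with
  | nil => simp [joinComma, encTail]
  | cons y ys ih => simp [encTail] at ih; simp [joinComma, encTail, ih y]

lemma length_encTail_ge {α : Type} (enc : α → List Char) (xs : List α) :
    xs.length ≤ (encTail enc xs).length := by
  induction xs with
  | nil => simp [encTail]
  | cons x xs ih => simp [encTail] at ih ⊢; omega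

lemma decElems_rt {α : Type} (dec : List Char → Option (α × List Char)) (enc : α → List Char)
    (H : ∀ x rest, dec (enc x ++ rest) = some (x, rest)) :
    ∀ (xs : List α) (fuel : Nat), xs.length ≤ fuel →
      ∀ rest, decElems dec fuel (encTail enc xs ++ ']' :: rest) = some (xs, rest) := by
  intro xs
  induction xs with
  | nil => intro fuel _ rest; rw [decElems.eq_def]; simp [encTail]
  | cons x xs ih =>
    intro fuel hf rest
    match fuel, hf with
    | f + 1, hf =>
      have hf' : xs.length ≤ f := by simpa using hf
      have hx := H x (encTail enc xs ++ ']' :: rest)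
      have hxs := ih f hf' rest
      simp only [encTail, List.flatMap_cons, List.cons_append, List.append_assoc] at hx hxs ⊢
      rw [decElems.eq_def]
      simp [hx, hxs]

lemma decList_rt {α : Type} (dec : List Char → Option (α × List Char)) (enc : α → List Char)
    (H : ∀ x rest, dec (enc x ++ rest) = some (x, rest))
    (Hhead : ∀ x, ∃ c t, enc x = c :: t ∧ c ≠ ']')
    (xs : List α) (rest : List Char) :
    decList dec ('[' :: (joinComma (xs.map enc) ++ ']' :: rest)) = some (xs, rest) := by
  match xs with
  | [] => simp [joinComma, decList]
  | x :: xs =>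
    obtain ⟨c, t, hct, hc⟩ := Hhead x
    rw [joinComma_cons]
    have hd : dec (c :: (t ++ (encTail enc xs ++ ']' :: rest))) = some (x, encTail enc xs ++ ']' :: rest) := by
      have := H x (encTail enc xs ++ ']' :: rest)
      rw [hct] at this
      simpa using this
    have hfuel : xs.length ≤ (encTail enc xs ++ ']' :: rest).length := by
      have := length_encTail_ge enc xs; simp; omega
    have helems := decElems_rt dec enc H xs _ hfuel rest
    simp only [List.length_append, List.length_cons] at helems
    rw [List.append_assoc, hct, List.cons_append]
    simp [decList, hc, hd, helems]

lemma encStr_head (cs : List Char) : ∃ c t, reprStrChars cs = c :: t ∧ c ≠ ']' := by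
  unfold reprStrChars
  split
  · exact ⟨'"', _, rfl, by decide⟩
  · exact ⟨'\'', _, rfl, by decide⟩

lemma decRow_rt (r : List String) (rest : List Char) : decRow (encRow r ++ rest) = some (r, rest) := by
  have hmap : r.map (fun s => reprStrChars s.toList) = (r.map String.toList).map reprStrChars := by
    simp [List.map_map, Function.comp_def]
  have := decList_rt decStr reprStrChars decStr_rt
    (fun cs => encStr_head cs) (r.map String.toList) rest
  unfold decRow encRow
  rw [hmap]
  simp only [List.cons_append, List.append_assoc, List.nil_append]
  rw [this]
  simp [List.map_map, Function.comp_def]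

lemma decTable_rt (t : List (List String)) (rest : List Char) : decTable (encTable t ++ rest) = some (t, rest) := by
  have := decList_rt decRow encRow decRow_rt
    (fun r => ⟨'[', _, rfl, by decide⟩) t rest
  unfold decTable encTable
  simp only [List.cons_append, List.append_assoc, List.nil_append]
  exact this

lemma pyStrTable_inj (t1 t2 : List (List String)) (h : pyStrTable t1 = pyStrTable t2) : t1 = t2 := by
  have h' : encTable t1 = encTable t2 := by
    have := congrArg String.toList h
    simpa [pyStrTable] using this
  have h1 := decTable_rt t1 []
  rw [show encTable t1 ++ ([] : List Char) = encTable t1 by simp, h'] at h1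
  have h2 := decTable_rt t2 []
  rw [show encTable t2 ++ ([] : List Char) = encTable t2 by simp] at h2
  rw [h2] at h1
  have h3 : t2 = t1 := by simpa using h1
  exact h3.symm

-- A's loop with its seen-set replaced by plain list membership over the accumulator
-- (the seen-set is exactly the image of pyStrTable over the accumulated list)
lemma loop_eq (tables : List (List (List String))) :
    ∀ (uniq : List (List (List String))) (seen : PySem.Set String),
      (∀ s, PySem.Set.contains seen s = true ↔ ∃ u ∈ uniq, pyStrTable u = s) →
      (tables.foldl
        (fun (st : List (List (List String)) × PySem.Set String) table =>
          let table_str := pyStrTable table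
          if PySem.Set.contains st.2 table_str then st
          else (st.1 ++ [table], PySem.Set.add st.2 table_str))
        (uniq, seen)).1
      = tables.foldl (fun unique_tables table =>
          if table ∈ unique_tables then unique_tables else unique_tables ++ [table]) uniq := by
  induction tables with
  | nil => intro uniq seen _; rfl
  | cons t ts ih =>
    intro uniq seen hinv
    have hcond : PySem.Set.contains seen (pyStrTable t) = true ↔ t ∈ uniq := by
      rw [hinv]
      constructor
      · rintro ⟨u, hu, hs⟩; rwa [← pyStrTable_inj u t hs]
      · intro h; exact ⟨t, h, rfl⟩
    by_cases hmem : t ∈ uniq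
    · have hc : PySem.Set.contains seen (pyStrTable t) = true := hcond.mpr hmem
      simp only [List.foldl_cons, hc, if_pos, hmem]
      exact ih uniq seen hinv
    · have hc : ¬ (PySem.Set.contains seen (pyStrTable t) = true) := fun h => hmem (hcond.mp h)
      simp only [List.foldl_cons, hc, hmem, if_false]
      apply ih
      intro s
      rw [PySem.Set.contains_iff, PySem.Set.mem_add, ← PySem.Set.contains_iff, hinv]
      constructor
      · rintro (⟨u, hu, hs⟩ | rfl)
        · exact ⟨u, by simp [hu], hs⟩
        · exact ⟨t, by simp, rfl⟩
      · rintro ⟨u, hu, hs⟩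
        rcases List.mem_append.mp hu with h | h
        · exact Or.inl ⟨u, h, hs⟩
        · simp at h; subst h; exact Or.inr hs.symm

lemma rdtSieve_cons (res : List (List (List String))) (h : List (List String)) (rest : List (List (List String))) :
    rdtSieve res (h :: rest) = rdtSieve (res ++ [h]) (rest.filter (fun t => t ≠ h)) := by
  rw [rdtSieve.eq_def]

-- membership fold = sieve on the residue of the accumulator
lemma fold_eq_sieve (ts : List (List (List String))) :
    ∀ (res : List (List (List String))),
      ts.foldl (fun unique_tables table =>
          if table ∈ unique_tables then unique_tables else unique_tables ++ [table]) res
      = rdtSieve res (ts.filter (fun t => t ∉ res)) := by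
  induction ts with
  | nil => intro res; simp [rdtSieve]
  | cons t ts ih =>
    intro res
    by_cases hmem : t ∈ res
    · simp only [List.foldl_cons, if_pos hmem, List.filter_cons,
        show (decide (t ∉ res)) = false by simp [hmem]]
      exact ih res
    · simp only [List.foldl_cons, if_neg hmem, List.filter_cons,
        show (decide (t ∉ res)) = true by simp [hmem], if_true]
      rw [ih (res ++ [t]), rdtSieve_cons]
      congr 1
      rw [List.filter_filter]
      apply List.filter_congr
      intro x _
      simp only [List.mem_append, List.mem_singleton, decide_not]
      by_cases hx : x ∈ res <;> by_cases ht : x = t <;> simp [hx, ht]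

-- ===== VERDICT (by name: the statement is the Claim_ definition above) =====
theorem remove_duplicate_tables_py_spec : Claim_equal_remove_duplicate_tables_py := by
  intro tables _
  unfold Spec_remove_duplicate_tables_py remove_duplicate_tables_py remove_duplicate_tables_py_alt
  rw [loop_eq tables [] PySem.Set.empty (by simp [PySem.Set.contains, PySem.Set.empty]),
    fold_eq_sieve tables []]
  simp
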